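-- pv_equiv track=rewrite | github.com/Zlmrfi/excelsior.huawei | DigitalLab/digital_lab_brute_force_solution.py | digital_lab_bf
-- ===== SOURCE A (Python) =====
-- from collections import namedtuple
--
-- Point = namedtuple('point', 'x y')
--
-- Pattern = namedtuple('pattern', 'A B C D')
--
-- def digital_lab_bf(n_a, m_a, n_b, m_b, a, b):
--     # brute force solution
--     # Time Complexity: O(n_a * m_a * n_b * m_b)
--     # matrix b will be changed
--     patterns = []
--
--     def is_matches_with_a(pattern_):
--         # returns true if the pattern matches A, false otherwise
--         for i in range(n_a):
--             for j in range(m_a):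
--                 if a[i][j] != b[i + pattern_.A.x][j + pattern_.A.y]:
--                     return False
--         return True
--
--     def mark_a_located_pattern(pattern_):
--         for i in range(pattern_.A.x, pattern_.D.x + 1):
--             for j in range(pattern_.A.y, pattern_.B.y + 1):
--                 if b[i][j] == '0':
--                     b[i][j] = '*'
--                 elif b[i][j] == '1':
--                     b[i][j] = '2'
--
--     # adding all submatrices of size A from B
--     for p_i in range(n_b - n_a + 1):
--         for p_j in range(m_b - m_a + 1):
--             patterns.append(
--                 Pattern(Point(p_i, p_j), Point(p_i, p_j + m_a - 1), Point(p_i + n_a - 1, p_j + m_a - 1),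
--                         Point(p_i + n_a - 1, p_j)))
--
--     matched_patterns = list(filter(is_matches_with_a, patterns))
--     for m_pattern in matched_patterns:
--         mark_a_located_pattern(m_pattern)
--
--     return b
-- ===== SOURCE B (Python) =====
-- def digital_lab_bf(n_a, m_a, n_b, m_b, a, b):
--     # Row-slice matching + per-cell coverage rebuild; does NOT mutate b
--     # (equivalence is about the return value; A mutates b in place).
--     matches = [(p, q)
--                for p in range(n_b - n_a + 1)
--                for q in range(m_b - m_a + 1)
--                if all(a[i] == b[p + i][q:q + m_a] for i in range(n_a))]
--
--     def covered(i, j):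
--         return any(p <= i < p + n_a and q <= j < q + m_a for p, q in matches)
--
--     def mark(x):
--         if x == '0':
--             return '*'
--         if x == '1':
--             return '2'
--         return x
--
--     return [[mark(x) if covered(i, j) else x for j, x in enumerate(row)]
--             for i, row in enumerate(b)]
-- ===== Notes on version B (the rewrite author's own statement) =====
-- stated objective: alternative
-- what changed: B matches each candidate position by whole-row slice equality instead of a per-element double loop, and produces the marked matrix functionally by rebuilding every cell from a coverage predicate over the match list, instead of A's in-place per-pattern rectangle mutation of b.
-- outside the precondition, e.g. on digital_lab_bf(1, 1, 1, 1, [['0', '7']], [['0']]): A returns [['*']], B returns [['0']]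
import Mathlib
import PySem

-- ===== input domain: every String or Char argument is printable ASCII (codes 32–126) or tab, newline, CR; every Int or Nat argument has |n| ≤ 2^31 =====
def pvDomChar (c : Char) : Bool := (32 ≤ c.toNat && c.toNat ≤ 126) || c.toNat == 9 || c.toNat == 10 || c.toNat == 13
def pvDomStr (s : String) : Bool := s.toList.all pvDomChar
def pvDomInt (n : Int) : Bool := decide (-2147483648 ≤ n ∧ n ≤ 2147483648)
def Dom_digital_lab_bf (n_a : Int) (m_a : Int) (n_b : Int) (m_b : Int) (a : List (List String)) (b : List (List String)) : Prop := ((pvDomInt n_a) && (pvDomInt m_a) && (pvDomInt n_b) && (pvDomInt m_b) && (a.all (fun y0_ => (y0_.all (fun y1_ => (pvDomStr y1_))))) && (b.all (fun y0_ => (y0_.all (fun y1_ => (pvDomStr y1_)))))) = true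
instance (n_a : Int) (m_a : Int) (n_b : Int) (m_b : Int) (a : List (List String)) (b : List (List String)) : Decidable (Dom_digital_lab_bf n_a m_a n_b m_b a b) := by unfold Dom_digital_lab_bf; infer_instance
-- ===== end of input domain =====

-- B replaces A's per-element match loops by row-slice comparisons and A's in-place rectangle marking
-- by a functional per-cell rebuild from a coverage predicate (alternative decomposition, same cost);
-- A mutates b in place, B does not — the equivalence proved is about the return value.


-- ===== PORT A =====
-- a Pattern is the namedtuple (A, B, C, D) of four (x, y) points
abbrev pvPat : Type := (Int × Int) × (Int × Int) × (Int × Int) × (Int × Int)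

-- a[i][j] (indices known in range under Pre_; defaults are never hit there)
def pvGet2 (xs : List (List String)) (i j : Int) : String :=
  PySem.List.pyGetD (PySem.List.pyGetD xs i []) j ""

-- is_matches_with_a (early-return double loop = short-circuiting List.all)
def pvMatchesA (n_a m_a : Int) (a b : List (List String)) (pat : pvPat) : Bool :=
  (PySem.List.pyRange 0 n_a 1).all (fun i =>
    (PySem.List.pyRange 0 m_a 1).all (fun j =>
      pvGet2 a i j == pvGet2 b (i + pat.1.1) (j + pat.1.2)))

-- b[i][j] = v  (marking indices are always ≥ 0, so .toNat is exact)
def pvSet2 (bs : List (List String)) (i j : Int) (v : String) : List (List String) :=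
  bs.modify i.toNat (fun row => row.set j.toNat v)

-- the body of mark_a_located_pattern's inner loop
def pvMarkCell (bs : List (List String)) (i j : Int) : List (List String) :=
  let cur := pvGet2 bs i j
  if cur = "0" then pvSet2 bs i j "*"
  else if cur = "1" then pvSet2 bs i j "2"
  else bs

-- mark_a_located_pattern
def pvMarkPat (pat : pvPat) (bs : List (List String)) : List (List String) :=
  (PySem.List.pyRange pat.1.1 (pat.2.2.2.1 + 1) 1).foldl (fun bs i =>
    (PySem.List.pyRange pat.1.2 (pat.2.1.2 + 1) 1).foldl (fun bs j =>
      pvMarkCell bs i j) bs) bs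

def digital_lab_bf (n_a : Int) (m_a : Int) (n_b : Int) (m_b : Int) (a : List (List String)) (b : List (List String)) : List (List String) :=
  let patterns : List pvPat :=
    (PySem.List.pyRange 0 (n_b - n_a + 1) 1).foldl (fun acc p_i =>
      (PySem.List.pyRange 0 (m_b - m_a + 1) 1).foldl (fun acc p_j =>
        acc ++ [((p_i, p_j), (p_i, p_j + m_a - 1), (p_i + n_a - 1, p_j + m_a - 1),
                 (p_i + n_a - 1, p_j))]) acc) []
  let matched_patterns := patterns.filter (pvMatchesA n_a m_a a b)
  matched_patterns.foldl (fun bs pat => pvMarkPat pat bs) b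

-- ===== PORT B =====
def pvMark (x : String) : String := if x = "0" then "*" else if x = "1" then "2" else x

def pvCovered (n_a m_a : Int) (ms : List (Int × Int)) (i j : Int) : Bool :=
  ms.any (fun pq => pq.1 ≤ i && i < pq.1 + n_a && pq.2 ≤ j && j < pq.2 + m_a)

def pvMatches (n_a m_a n_b m_b : Int) (a b : List (List String)) : List (Int × Int) :=
  (PySem.List.pyRange 0 (n_b - n_a + 1) 1).flatMap (fun p =>
    (PySem.List.pyRange 0 (m_b - m_a + 1) 1).filterMap (fun q =>
      if (PySem.List.pyRange 0 n_a 1).all (fun i =>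
           PySem.List.pyGetD a i [] ==
             PySem.List.slice (PySem.List.pyGetD b (p + i) []) (some q) (some (q + m_a)))
      then some (p, q) else none))

def digital_lab_bf_alt (n_a : Int) (m_a : Int) (n_b : Int) (m_b : Int) (a : List (List String)) (b : List (List String)) : List (List String) :=
  let ms := pvMatches n_a m_a n_b m_b a b
  (PySem.List.enumerate b 0).map (fun ir =>
    (PySem.List.enumerate ir.2 0).map (fun jx =>
      if pvCovered n_a m_a ms ir.1 jx.1 then pvMark jx.2 else jx.2))

-- ===== PRECONDITION & SPEC =====
-- Pre_ admits inputs whose stated dimensions equal the actual list sizes, plus all degenerate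
-- inputs (no candidate position, or an empty pattern height) on which neither program indexes
-- anything; it excludes the remaining mismatched-dimension inputs, where A usually raises
-- IndexError or, when the lists are larger than stated, compares only a stated-size window of a
-- row A's and B's row comparison read differently.
def Pre_digital_lab_bf (n_a : Int) (m_a : Int) (n_b : Int) (m_b : Int) (a : List (List String)) (b : List (List String)) : Prop :=
  ((a.length : Int) = n_a ∧ (∀ r ∈ a, (r.length : Int) = m_a) ∧
   (b.length : Int) = n_b ∧ (∀ r ∈ b, (r.length : Int) = m_b)) ∨
  n_a ≤ 0 ∨ n_b < n_a ∨ m_b < m_a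
instance (n_a : Int) (m_a : Int) (n_b : Int) (m_b : Int) (a : List (List String)) (b : List (List String)) : Decidable (Pre_digital_lab_bf n_a m_a n_b m_b a b) := by unfold Pre_digital_lab_bf; infer_instance

def pvWitness_digital_lab_bf : Int × Int × Int × Int × List (List String) × List (List String) :=
  (1, 2, 2, 3, [["0", "1"]], [["0", "1", "0"], ["1", "0", "1"]])

def Spec_digital_lab_bf (n_a : Int) (m_a : Int) (n_b : Int) (m_b : Int) (a : List (List String)) (b : List (List String)) (out : List (List String)) : Prop := out = digital_lab_bf_alt n_a m_a n_b m_b a b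
instance (n_a : Int) (m_a : Int) (n_b : Int) (m_b : Int) (a : List (List String)) (b : List (List String)) (out : List (List String)) : Decidable (Spec_digital_lab_bf n_a m_a n_b m_b a b out) := by unfold Spec_digital_lab_bf; infer_instance

-- ===== CLAIM (what is proved, stated in full; the proofs are below) =====
def Claim_equal_digital_lab_bf : Prop := ∀ (n_a : Int) (m_a : Int) (n_b : Int) (m_b : Int) (a : List (List String)) (b : List (List String)), Dom_digital_lab_bf n_a m_a n_b m_b a b → Pre_digital_lab_bf n_a m_a n_b m_b a b → Spec_digital_lab_bf n_a m_a n_b m_b a b (digital_lab_bf n_a m_a n_b m_b a b)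

-- ===== LEMMAS AND PROOFS =====

-- the Pattern A's port builds at position (p, q)
def patOf (n_a m_a : Int) (pq : Int × Int) : pvPat :=
  ((pq.1, pq.2), (pq.1, pq.2 + m_a - 1), (pq.1 + n_a - 1, pq.2 + m_a - 1), (pq.1 + n_a - 1, pq.2))

-- cell (x, y) of a matrix, as an Option
def pvGet2? (bs : List (List String)) (x y : Nat) : Option String :=
  bs[x]?.bind (fun r => r[y]?)

theorem pvMark_idem (s : String) : pvMark (pvMark s) = pvMark s := by
  unfold pvMark; split_ifs <;> simp_all

theorem pvMark_comp : pvMark ∘ pvMark = pvMark := funext pvMark_idem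

theorem pvMarkCell_cell (bs : List (List String)) (n m x y : Nat) :
    pvGet2? (pvMarkCell bs (n : Int) (m : Int)) x y =
      if x = n ∧ y = m then (pvGet2? bs x y).map pvMark
      else pvGet2? bs x y := by
  unfold pvMarkCell pvGet2 pvSet2 pvGet2?
  simp only [PySem.List.pyGetD_natCast, Int.toNat_natCast]
  by_cases hn : n < bs.length
  · rw [List.getD_eq_getElem bs [] hn]
    by_cases hm : m < (bs[n]).length
    · rw [List.getD_eq_getElem bs[n] "" hm]
      split_ifs with h0 h1 <;>
        by_cases hx : x = n <;> by_cases hy : y = m <;>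
          simp_all [List.getElem?_modify, List.getElem?_set, pvMark] <;>
          first
          | (intro h; omega)
          | (cases hbx : bs[x]? <;> simp_all [eq_comm])
    · rw [List.getD_eq_default bs[n] "" (by omega)]
      have hnone : (bs[n])[m]? = none := by simp; omega
      by_cases hx : x = n <;> by_cases hy : y = m <;> simp_all
  · rw [List.getD_eq_default bs [] (by omega)]
    have hnone : bs[n]? = none := by simp; omega
    by_cases hx : x = n <;> by_cases hy : y = m <;> simp_all

theorem foldl_markCell_cell (n : Nat) (x y : Nat) :
    ∀ (js : List Int), (∀ j ∈ js, 0 ≤ j) → ∀ (bs : List (List String)),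
    pvGet2? (js.foldl (fun bs j => pvMarkCell bs (n : Int) j) bs) x y =
      if x = n ∧ (∃ j ∈ js, (y : Int) = j) then (pvGet2? bs x y).map pvMark
      else pvGet2? bs x y := by
  intro js
  induction js with
  | nil => intro _ bs; simp
  | cons j js ih =>
    intro hjs bs
    obtain ⟨jn, rfl⟩ : ∃ jn : Nat, j = (jn : Int) :=
      ⟨j.toNat, by have := hjs j (by simp); omega⟩
    have hjs' : ∀ j' ∈ js, 0 ≤ j' := fun j' h => hjs j' (by simp [h])
    rw [List.foldl_cons, ih hjs' _, pvMarkCell_cell]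
    by_cases hx : x = n <;> by_cases hy : y = jn <;>
      split_ifs <;> simp_all [pvMark_comp]

theorem foldl_markRow_cell (x y : Nat) (js : List Int) (hjs : ∀ j ∈ js, 0 ≤ j) :
    ∀ (is : List Int), (∀ i ∈ is, 0 ≤ i) → ∀ (bs : List (List String)),
    pvGet2? (is.foldl (fun bs i => js.foldl (fun bs j => pvMarkCell bs i j) bs) bs) x y =
      if (∃ i ∈ is, (x : Int) = i) ∧ (∃ j ∈ js, (y : Int) = j) then
        (pvGet2? bs x y).map pvMark
      else pvGet2? bs x y := by
  intro is
  induction is with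
  | nil => intro _ bs; simp
  | cons i is ih =>
    intro his bs
    obtain ⟨inn, rfl⟩ : ∃ inn : Nat, i = (inn : Int) :=
      ⟨i.toNat, by have := his i (by simp); omega⟩
    have his' : ∀ i' ∈ is, 0 ≤ i' := fun i' h => his i' (by simp [h])
    rw [List.foldl_cons, ih his' _, foldl_markCell_cell inn x y js hjs]
    by_cases hx : x = inn <;> by_cases hy : (∃ j ∈ js, (y : Int) = j) <;>
      split_ifs <;> simp_all [pvMark_comp]

theorem pvMarkPat_cell (n_a m_a p q : Int) (hp : 0 ≤ p) (hq : 0 ≤ q)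
    (bs : List (List String)) (x y : Nat) :
    pvGet2? (pvMarkPat (patOf n_a m_a (p, q)) bs) x y =
      if (p ≤ (x : Int) ∧ (x : Int) < p + n_a) ∧ (q ≤ (y : Int) ∧ (y : Int) < q + m_a) then
        (pvGet2? bs x y).map pvMark
      else pvGet2? bs x y := by
  have hx : (∃ i ∈ PySem.List.pyRange p (p + n_a - 1 + 1) 1, (x : Int) = i) ↔
      (p ≤ (x : Int) ∧ (x : Int) < p + n_a) := by
    constructor
    · rintro ⟨i, hi, rfl⟩; rw [PySem.List.mem_pyRange_one] at hi; omega
    · intro h; exact ⟨x, by rw [PySem.List.mem_pyRange_one]; omega, rfl⟩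
  have hy : (∃ j ∈ PySem.List.pyRange q (q + m_a - 1 + 1) 1, (y : Int) = j) ↔
      (q ≤ (y : Int) ∧ (y : Int) < q + m_a) := by
    constructor
    · rintro ⟨j, hj, rfl⟩; rw [PySem.List.mem_pyRange_one] at hj; omega
    · intro h; exact ⟨y, by rw [PySem.List.mem_pyRange_one]; omega, rfl⟩
  unfold pvMarkPat patOf
  dsimp only
  rw [foldl_markRow_cell x y _ (fun j hj => by rw [PySem.List.mem_pyRange_one] at hj; omega)
    _ (fun i hi => by rw [PySem.List.mem_pyRange_one] at hi; omega)]
  rw [if_congr (and_congr hx hy) rfl rfl]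

theorem foldl_markPats_cell (n_a m_a : Int) (ms : List (Int × Int))
    (hms : ∀ pq ∈ ms, 0 ≤ pq.1 ∧ 0 ≤ pq.2) (bs : List (List String)) (x y : Nat) :
    pvGet2? (ms.foldl (fun bs pq => pvMarkPat (patOf n_a m_a pq) bs) bs) x y =
      if pvCovered n_a m_a ms (x : Int) (y : Int) = true then
        (pvGet2? bs x y).map pvMark
      else pvGet2? bs x y := by
  induction ms generalizing bs with
  | nil => simp [pvCovered]
  | cons pq ms ih =>
    have h1 := hms pq (by simp)
    have hms' : ∀ pq' ∈ ms, 0 ≤ pq'.1 ∧ 0 ≤ pq'.2 := fun pq' h => hms pq' (by simp [h])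
    obtain ⟨p, q⟩ := pq
    simp only [List.foldl_cons, ih hms', pvMarkPat_cell n_a m_a p q h1.1 h1.2]
    have hcons : (pvCovered n_a m_a ((p, q) :: ms) (x : Int) (y : Int) = true) ↔
        (((p ≤ (x:Int) ∧ (x:Int) < p + n_a) ∧ (q ≤ (y:Int) ∧ (y:Int) < q + m_a)) ∨
          pvCovered n_a m_a ms (x : Int) (y : Int) = true) := by
      simp [pvCovered, List.any_cons, and_assoc]

    by_cases hA : pvCovered n_a m_a ms (x : Int) (y : Int) = true <;>
      by_cases hB : ((p ≤ (x:Int) ∧ (x:Int) < p + n_a) ∧ (q ≤ (y:Int) ∧ (y:Int) < q + m_a)) <;>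
      simp [hcons, hA, hB, pvMark_comp]

-- length preservation through A's marking
theorem length_pvMarkCell (bs : List (List String)) (i j : Int) :
    (pvMarkCell bs i j).length = bs.length := by
  unfold pvMarkCell pvSet2; dsimp only; split_ifs <;> simp [List.length_modify]

theorem length_foldl_of_preserve {α : Type} (f : List (List String) → α → List (List String))
    (hf : ∀ bs v, (f bs v).length = bs.length) (l : List α) (bs : List (List String)) :
    (l.foldl f bs).length = bs.length := by
  induction l generalizing bs with
  | nil => rfl
  | cons v l ih => rw [List.foldl_cons, ih, hf]

theorem length_pvMarkPat (pat : pvPat) (bs : List (List String)) :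
    (pvMarkPat pat bs).length = bs.length := by
  unfold pvMarkPat
  exact length_foldl_of_preserve _
    (fun bs i => length_foldl_of_preserve _ (fun bs j => length_pvMarkCell bs i j) _ bs) _ bs

-- ===== Part 1 : the two match computations agree =====

theorem filterMap_if_eq {α β : Type} (f : α → β) (c : α → Bool) (l : List α) :
    l.filterMap (fun x => if c x then some (f x) else none) =
      (l.filter c).map f := by
  induction l with
  | nil => rfl
  | cons x l ih => cases h : c x <;> simp [h, ih]

theorem flatMap_congr_mem {α β : Type} {l : List α} {f g : α → List β}
    (h : ∀ x ∈ l, f x = g x) : l.flatMap f = l.flatMap g := by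
  induction l with
  | nil => rfl
  | cons x l ih =>
    simp only [List.flatMap_cons, h x (by simp), ih (fun x hx => h x (by simp [hx]))]

theorem pats_eq (n_a m_a n_b m_b : Int) :
    ((PySem.List.pyRange 0 (n_b - n_a + 1) 1).foldl (fun acc p_i =>
      (PySem.List.pyRange 0 (m_b - m_a + 1) 1).foldl (fun acc p_j =>
        acc ++ [((p_i, p_j), (p_i, p_j + m_a - 1), (p_i + n_a - 1, p_j + m_a - 1),
                 (p_i + n_a - 1, p_j))]) acc) ([] : List pvPat)) =
      (PySem.List.pyRange 0 (n_b - n_a + 1) 1).flatMap (fun p =>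
        (PySem.List.pyRange 0 (m_b - m_a + 1) 1).map (fun q => patOf n_a m_a (p, q))) := by
  simp only [PySem.List.foldl_append_singleton_eq_map, PySem.List.foldl_append_eq_flatMap,
    List.nil_append]
  rfl

theorem all_congr_mem {α : Type} {l : List α} {p q : α → Bool}
    (h : ∀ x ∈ l, p x = q x) : l.all p = l.all q := by
  rw [Bool.eq_iff_iff, List.all_eq_true, List.all_eq_true]
  exact ⟨fun H x hx => (h x hx) ▸ H x hx, fun H x hx => (h x hx) ▸ H x hx⟩

theorem pvGet2_getD (xs : List (List String)) (n m : Nat) :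
    pvGet2 xs (n : Int) (m : Int) = (xs.getD n []).getD m "" := by
  unfold pvGet2
  simp [PySem.List.pyGetD_natCast]

theorem match_pointwise (n_a m_a n_b m_b : Int) (a b : List (List String))
    (pre : (a.length : Int) = n_a ∧ (∀ r ∈ a, (r.length : Int) = m_a) ∧
      (b.length : Int) = n_b ∧ (∀ r ∈ b, (r.length : Int) = m_b)) (p q : Int)
    (hp : 0 ≤ p) (hpn : p + n_a ≤ n_b) (hq : 0 ≤ q) (hqm : q + m_a ≤ m_b) :
    pvMatchesA n_a m_a a b (patOf n_a m_a (p, q)) =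
      (PySem.List.pyRange 0 n_a 1).all (fun i =>
        PySem.List.pyGetD a i [] ==
          PySem.List.slice (PySem.List.pyGetD b (p + i) []) (some q) (some (q + m_a))) := by
  obtain ⟨ha, har, hb, hbr⟩ := pre
  unfold pvMatchesA patOf
  dsimp only
  apply all_congr_mem
  intro i hi
  rw [PySem.List.mem_pyRange_one] at hi
  obtain ⟨inn, rfl⟩ : ∃ inn : Nat, i = (inn : Int) := ⟨i.toNat, by omega⟩
  -- names for the two rows
  have hia : inn < a.length := by omega
  have hib : (p + (inn : Int)).toNat < b.length := by omega
  have hrowA : PySem.List.pyGetD a (inn : Int) [] = a[inn] := by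
    rw [PySem.List.pyGetD_natCast, List.getD_eq_getElem a [] hia]
  have hrowB : PySem.List.pyGetD b (p + (inn : Int)) [] = b[(p + (inn : Int)).toNat] := by
    rw [PySem.List.pyGetD_eq_getElem b [] (by omega) (by exact_mod_cast by omega : (p + (inn : Int)) < (b.length : Int))]
  have hlenA : (a[inn].length : Int) = m_a := har _ (List.getElem_mem hia)
  have hlenB : (b[(p + (inn : Int)).toNat].length : Int) = m_b := hbr _ (List.getElem_mem hib)
  have hma : 0 ≤ m_a := by omega
  rw [hrowA, hrowB]
  rw [PySem.List.slice_toNat _ hq (by omega)]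
  rw [Bool.eq_iff_iff, List.all_eq_true, beq_iff_eq]
  constructor
  · intro H
    apply List.ext_getElem
    · simp [List.length_take, List.length_drop]; omega
    · intro jn h1 h2
      rw [List.getElem_take, List.getElem_drop]
      have hj := H (jn : Int) (by rw [PySem.List.mem_pyRange_one]; omega)
      rw [beq_iff_eq] at hj
      have e1 : pvGet2 a (inn : Int) (jn : Int) = (a.getD inn []).getD jn "" :=
        pvGet2_getD a inn jn
      have e2 : pvGet2 b ((inn : Int) + p) ((jn : Int) + q) =
          (b.getD ((inn : Int) + p).toNat []).getD ((jn : Int) + q).toNat "" := by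
        obtain ⟨n2, hn2⟩ : ∃ n2 : Nat, (inn : Int) + p = (n2 : Nat) := ⟨((inn : Int) + p).toNat, by omega⟩
        obtain ⟨m2, hm2⟩ : ∃ m2 : Nat, (jn : Int) + q = (m2 : Nat) := ⟨((jn : Int) + q).toNat, by omega⟩
        rw [hn2, hm2, pvGet2_getD]
        simp
      rw [e1, e2] at hj
      rw [List.getD_eq_getElem a [] hia] at hj
      have hb2 : ((inn : Int) + p).toNat = (p + (inn : Int)).toNat := by omega
      rw [hb2, List.getD_eq_getElem b [] hib] at hj
      rw [List.getD_eq_getElem _ "" (by omega), List.getD_eq_getElem _ "" (by omega)] at hj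
      convert hj using 2
      omega
  · intro H j hj
    rw [PySem.List.mem_pyRange_one] at hj
    obtain ⟨jn, rfl⟩ : ∃ jn : Nat, j = (jn : Int) := ⟨j.toNat, by omega⟩
    rw [beq_iff_eq]
    have e1 : pvGet2 a (inn : Int) (jn : Int) = (a.getD inn []).getD jn "" :=
      pvGet2_getD a inn jn
    have e2 : pvGet2 b ((inn : Int) + p) ((jn : Int) + q) =
        (b.getD ((inn : Int) + p).toNat []).getD ((jn : Int) + q).toNat "" := by
      obtain ⟨n2, hn2⟩ : ∃ n2 : Nat, (inn : Int) + p = (n2 : Nat) := ⟨((inn : Int) + p).toNat, by omega⟩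
      obtain ⟨m2, hm2⟩ : ∃ m2 : Nat, (jn : Int) + q = (m2 : Nat) := ⟨((jn : Int) + q).toNat, by omega⟩
      rw [hn2, hm2, pvGet2_getD]
      simp
    rw [e1, e2]
    rw [List.getD_eq_getElem a [] hia]
    have hb2 : ((inn : Int) + p).toNat = (p + (inn : Int)).toNat := by omega
    rw [hb2, List.getD_eq_getElem b [] hib]
    rw [List.getD_eq_getElem _ "" (by omega), List.getD_eq_getElem _ "" (by omega)]
    have := congrArg (fun l => l[jn]?) H
    simp only [List.getElem?_take, List.getElem?_drop] at this
    have hjn1 : jn < a[inn].length := by omega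
    have hjn2 : q.toNat + jn < b[(p + (inn : Int)).toNat].length := by omega
    rw [List.getElem?_eq_getElem hjn1] at this
    rw [if_pos (by omega : jn < (q + m_a).toNat - q.toNat),
      List.getElem?_eq_getElem hjn2] at this
    have h3 : a[inn][jn] = b[(p + (inn : Int)).toNat][q.toNat + jn] :=
      Option.some.inj this
    convert h3 using 2
    omega

theorem matched_eq (n_a m_a n_b m_b : Int) (a b : List (List String))
    (pre : (a.length : Int) = n_a ∧ (∀ r ∈ a, (r.length : Int) = m_a) ∧
      (b.length : Int) = n_b ∧ (∀ r ∈ b, (r.length : Int) = m_b)) :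
    (((PySem.List.pyRange 0 (n_b - n_a + 1) 1).flatMap (fun p =>
        (PySem.List.pyRange 0 (m_b - m_a + 1) 1).map (fun q => patOf n_a m_a (p, q)))).filter
      (pvMatchesA n_a m_a a b)) =
      (pvMatches n_a m_a n_b m_b a b).map (patOf n_a m_a) := by
  unfold pvMatches
  rw [List.filter_flatMap, List.map_flatMap]
  apply flatMap_congr_mem
  intro p hp
  rw [PySem.List.mem_pyRange_one] at hp
  rw [List.filter_map, filterMap_if_eq (fun q => (p, q))]
  rw [List.map_map]
  congr 1
  apply List.filter_congr
  intro q hq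
  rw [PySem.List.mem_pyRange_one] at hq
  exact match_pointwise n_a m_a n_b m_b a b pre p q (by omega) (by omega) (by omega) (by omega)

-- every reported match position is nonnegative
theorem pvMatches_nonneg (n_a m_a n_b m_b : Int) (a b : List (List String)) :
    ∀ pq ∈ pvMatches n_a m_a n_b m_b a b, 0 ≤ pq.1 ∧ 0 ≤ pq.2 := by
  intro pq h
  unfold pvMatches at h
  simp only [List.mem_flatMap, List.mem_filterMap] at h
  obtain ⟨p, hp, q, hq, hok⟩ := h
  rw [PySem.List.mem_pyRange_one] at hp
  rw [PySem.List.mem_pyRange_one] at hq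
  rcases ite_eq_iff.mp hok with ⟨hcnd, h2⟩ | ⟨hcnd, h2⟩
  · cases h2; exact ⟨by omega, by omega⟩
  · cases h2

-- ===== Part 3 : B's output, cell by cell =====

theorem getElem?_enumerate {α : Type} (xs : List α) (s : Int) (k : Nat) :
    (PySem.List.enumerate xs s)[k]? = xs[k]?.map (fun v => (s + k, v)) := by
  induction xs generalizing s k with
  | nil => simp [PySem.List.enumerate]
  | cons x xs ih =>
    rw [PySem.List.enumerate_cons]
    cases k with
    | zero => simp
    | succ k =>
      simp only [List.getElem?_cons_succ, ih (s + 1) k]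
      cases xs[k]? <;> simp [Prod.ext_iff]
      ring

theorem alt_cell (n_a m_a n_b m_b : Int) (a b : List (List String)) (x y : Nat) :
    pvGet2? (digital_lab_bf_alt n_a m_a n_b m_b a b) x y =
      if pvCovered n_a m_a (pvMatches n_a m_a n_b m_b a b) (x : Int) (y : Int) = true then
        (pvGet2? b x y).map pvMark
      else pvGet2? b x y := by
  unfold digital_lab_bf_alt pvGet2?
  simp only [List.getElem?_map, getElem?_enumerate, zero_add, Option.map_map]
  cases hr : b[x]? with
  | none => simp
  | some row =>
    simp only [Option.map_some, Option.bind_some, Function.comp]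
    cases hc : row[y]? with
    | none => have hly := List.getElem?_eq_none_iff.mp hc; simp [hly]
    | some v => split_ifs <;> simp_all

theorem length_alt (n_a m_a n_b m_b : Int) (a b : List (List String)) :
    (digital_lab_bf_alt n_a m_a n_b m_b a b).length = b.length := by
  unfold digital_lab_bf_alt
  simp

-- ===== final assembly =====

theorem main_eq (n_a m_a n_b m_b : Int) (a b : List (List String))
    (pre : (a.length : Int) = n_a ∧ (∀ r ∈ a, (r.length : Int) = m_a) ∧
      (b.length : Int) = n_b ∧ (∀ r ∈ b, (r.length : Int) = m_b)) :
    digital_lab_bf n_a m_a n_b m_b a b = digital_lab_bf_alt n_a m_a n_b m_b a b := by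
  have hms := pvMatches_nonneg n_a m_a n_b m_b a b
  have hms' : ∀ pq ∈ pvMatches n_a m_a n_b m_b a b, 0 ≤ pq.1 ∧ 0 ≤ pq.2 := hms
  unfold digital_lab_bf
  dsimp only
  rw [pats_eq n_a m_a n_b m_b, matched_eq n_a m_a n_b m_b a b pre, List.foldl_map]
  have hlenA : ((pvMatches n_a m_a n_b m_b a b).foldl
      (fun bs pq => pvMarkPat (patOf n_a m_a pq) bs) b).length = b.length :=
    length_foldl_of_preserve _ (fun bs pq => length_pvMarkPat _ bs) _ b
  have hlenB := length_alt n_a m_a n_b m_b a b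
  apply List.ext_getElem?
  intro x
  by_cases hx : x < b.length
  · rw [List.getElem?_eq_getElem (by omega), List.getElem?_eq_getElem (by omega)]
    congr 1
    apply List.ext_getElem?
    intro y
    have h1 : (((pvMatches n_a m_a n_b m_b a b).foldl
        (fun bs pq => pvMarkPat (patOf n_a m_a pq) bs) b)[x]'(by omega))[y]? =
        pvGet2? ((pvMatches n_a m_a n_b m_b a b).foldl
          (fun bs pq => pvMarkPat (patOf n_a m_a pq) bs) b) x y := by
      simp [pvGet2?, List.getElem?_eq_getElem (show x <
        ((pvMatches n_a m_a n_b m_b a b).foldl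
          (fun bs pq => pvMarkPat (patOf n_a m_a pq) bs) b).length by omega)]
    have h2 : ((digital_lab_bf_alt n_a m_a n_b m_b a b)[x]'(by omega))[y]? =
        pvGet2? (digital_lab_bf_alt n_a m_a n_b m_b a b) x y := by
      simp [pvGet2?, List.getElem?_eq_getElem (show x <
        (digital_lab_bf_alt n_a m_a n_b m_b a b).length by omega)]
    rw [h1, h2, foldl_markPats_cell n_a m_a _ hms' b x y, alt_cell]
  · rw [List.getElem?_eq_none_iff.mpr (by omega), List.getElem?_eq_none_iff.mpr (by omega)]

-- ===== degenerate cases admitted by Pre_ : both programs return b unchanged =====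

theorem pyRange_nil (a b : Int) (h : b ≤ a) : PySem.List.pyRange a b 1 = [] := by
  rw [PySem.List.pyRange_one]
  have h0 : (b - a).toNat = 0 := by omega
  simp [h0]

theorem foldl_id_of_mem {α β : Type} (l : List α) (f : β → α → β) (init : β)
    (h : ∀ acc, ∀ x ∈ l, f acc x = acc) : l.foldl f init = init := by
  induction l generalizing init with
  | nil => rfl
  | cons x l ih =>
    rw [List.foldl_cons, h init x (by simp)]
    exact ih _ (fun acc x hx => h acc x (by simp [hx]))

theorem a_deg (n_a m_a n_b m_b : Int) (a b : List (List String))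
    (h : n_a ≤ 0 ∨ n_b < n_a ∨ m_b < m_a) :
    digital_lab_bf n_a m_a n_b m_b a b = b := by
  unfold digital_lab_bf
  dsimp only
  rcases h with h | h | h
  · apply foldl_id_of_mem
    intro acc pat hpat
    have hpat' := (List.mem_filter.mp hpat).1
    rw [pats_eq] at hpat'
    simp only [List.mem_flatMap, List.mem_map] at hpat'
    obtain ⟨p, _, q, _, rfl⟩ := hpat'
    unfold pvMarkPat patOf
    dsimp only
    rw [pyRange_nil p (p + n_a - 1 + 1) (by omega)]
    rfl
  · rw [pyRange_nil 0 (n_b - n_a + 1) (by omega)]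
    rfl
  · simp only [pyRange_nil 0 (m_b - m_a + 1) (by omega), List.foldl_nil]
    rw [foldl_id_of_mem (PySem.List.pyRange 0 (n_b - n_a + 1) 1)
      (fun acc _ => acc) [] (fun _ _ _ => rfl)]
    rfl

theorem matches_nil (n_a m_a n_b m_b : Int) (a b : List (List String))
    (h : n_b < n_a ∨ m_b < m_a) : pvMatches n_a m_a n_b m_b a b = [] := by
  unfold pvMatches
  rcases h with h | h
  · rw [pyRange_nil 0 (n_b - n_a + 1) (by omega)]
    rfl
  · simp only [pyRange_nil 0 (m_b - m_a + 1) (by omega), List.filterMap_nil]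
    simp

theorem cov_false (n_a m_a n_b m_b : Int) (a b : List (List String))
    (h : n_a ≤ 0 ∨ n_b < n_a ∨ m_b < m_a) (i j : Int) :
    pvCovered n_a m_a (pvMatches n_a m_a n_b m_b a b) i j = false := by
  by_cases hna : n_a ≤ 0
  · rw [pvCovered, List.any_eq_false]
    intro pq _ hcontra
    simp only [Bool.and_eq_true, decide_eq_true_eq] at hcontra
    omega
  · rw [matches_nil n_a m_a n_b m_b a b (by tauto)]
    simp [pvCovered]

theorem eq_of_cells (n : Nat) (u v : List (List String)) (hu : u.length = n)
    (hv : v.length = n) (h : ∀ x y : Nat, pvGet2? u x y = pvGet2? v x y) : u = v := by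
  apply List.ext_getElem?
  intro x
  by_cases hx : x < n
  · rw [List.getElem?_eq_getElem (by omega), List.getElem?_eq_getElem (by omega)]
    congr 1
    apply List.ext_getElem?
    intro y
    have h1 : (u[x]'(by omega))[y]? = pvGet2? u x y := by
      simp [pvGet2?, List.getElem?_eq_getElem (show x < u.length by omega)]
    have h2 : (v[x]'(by omega))[y]? = pvGet2? v x y := by
      simp [pvGet2?, List.getElem?_eq_getElem (show x < v.length by omega)]
    rw [h1, h2, h]
  · rw [List.getElem?_eq_none_iff.mpr (by omega), List.getElem?_eq_none_iff.mpr (by omega)]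

theorem b_deg (n_a m_a n_b m_b : Int) (a b : List (List String))
    (h : n_a ≤ 0 ∨ n_b < n_a ∨ m_b < m_a) :
    digital_lab_bf_alt n_a m_a n_b m_b a b = b := by
  apply eq_of_cells b.length _ _ (length_alt n_a m_a n_b m_b a b) rfl
  intro x y
  rw [alt_cell, cov_false n_a m_a n_b m_b a b h]
  simp

-- ===== VERDICT (by name: the statement is the Claim_ definition above) =====
theorem digital_lab_bf_spec : Claim_equal_digital_lab_bf := by
  intro n_a m_a n_b m_b a b _dom pre
  unfold Spec_digital_lab_bf
  rcases pre with pre | h | h | h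
  · exact main_eq n_a m_a n_b m_b a b pre
  all_goals
    rw [a_deg n_a m_a n_b m_b a b (by tauto), b_deg n_a m_a n_b m_b a b (by tauto)]
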